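-- pv_equiv track=rewrite | github.com/RianMarlon/Python-Geek-University | secao14_iteradores_geradores/treinando_iteradores_geradores.py | fatoriais_lista
-- ===== SOURCE A (Python) =====
-- def fatoriais_lista(maximo):
--
--     fatoriais = []
--
--     for n in range(1, maximo):
--         fatorial = 1
--
--         for f in range(1, n):
--             fatorial *= f
--
--         fatoriais.append(fatorial)
--
--     return fatoriais
-- ===== SOURCE B (Python) =====
-- def fatoriais_lista(maximo):
--     fatoriais = []
--     fatorial = 1
--     for n in range(1, maximo):
--         fatoriais.append(fatorial)
--         fatorial *= n
--     return fatoriais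
-- ===== Notes on version B (the rewrite author's own statement) =====
-- stated objective: faster
-- what changed: B maintains the running product across iterations (each entry is the previous entry times n), replacing A's inner loop that recomputes each product from scratch.
import Mathlib
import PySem

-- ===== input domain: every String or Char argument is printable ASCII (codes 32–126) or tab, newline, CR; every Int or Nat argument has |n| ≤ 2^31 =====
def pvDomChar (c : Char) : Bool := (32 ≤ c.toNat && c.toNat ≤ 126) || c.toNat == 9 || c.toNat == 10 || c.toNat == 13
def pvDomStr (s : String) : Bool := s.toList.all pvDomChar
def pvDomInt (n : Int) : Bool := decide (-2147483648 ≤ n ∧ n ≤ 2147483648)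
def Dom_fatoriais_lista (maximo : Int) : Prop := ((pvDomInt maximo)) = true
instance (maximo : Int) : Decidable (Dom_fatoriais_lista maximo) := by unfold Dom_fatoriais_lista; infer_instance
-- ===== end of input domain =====

-- B replaces A's inner loop (recomputing each product from scratch) by one running product; objective: faster.

-- ===== PORT A =====
def fatoriais_lista (maximo : Int) : List Int :=
  (PySem.List.pyRange 1 maximo 1).foldl
    (fun fatoriais n =>
      fatoriais ++ [(PySem.List.pyRange 1 n 1).foldl (fun fatorial f => fatorial * f) 1])
    []

-- ===== PORT B =====
def fatoriais_lista_alt (maximo : Int) : List Int :=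
  ((PySem.List.pyRange 1 maximo 1).foldl
    (fun (st : List Int × Int) n => (st.1 ++ [st.2], st.2 * n))
    ([], 1)).1

-- ===== PRECONDITION & SPEC =====
def Spec_fatoriais_lista (maximo : Int) (out : List Int) : Prop := out = fatoriais_lista_alt maximo
instance (maximo : Int) (out : List Int) : Decidable (Spec_fatoriais_lista maximo out) := by unfold Spec_fatoriais_lista; infer_instance

-- ===== CLAIM (what is proved, stated in full; the proofs are below) =====
def Claim_equal_fatoriais_lista : Prop := ∀ (maximo : Int), Dom_fatoriais_lista maximo → Spec_fatoriais_lista maximo (fatoriais_lista maximo)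

-- ===== LEMMAS AND PROOFS =====

-- Joint invariant over the prefix range(1, 1+k): B's state is (A's output so far, next product).
theorem pv_invariant (k : Nat) :
    (PySem.List.pyRange 1 (1 + (k : Int)) 1).foldl
        (fun (st : List Int × Int) n => (st.1 ++ [st.2], st.2 * n)) ([], 1)
      = ((PySem.List.pyRange 1 (1 + (k : Int)) 1).foldl
            (fun fatoriais n =>
              fatoriais ++ [(PySem.List.pyRange 1 n 1).foldl (fun fatorial f => fatorial * f) 1])
            [],
         (PySem.List.pyRange 1 (1 + (k : Int)) 1).foldl (fun fatorial f => fatorial * f) 1) := by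
  induction k with
  | zero => simp [PySem.List.pyRange_one_eq_nil]
  | succ k ih =>
      have h : (1 : Int) ≤ 1 + (k : Int) := by omega
      have hsplit : PySem.List.pyRange 1 (1 + ((k : Int) + 1)) 1
          = PySem.List.pyRange 1 (1 + (k : Int)) 1 ++ [1 + (k : Int)] := by
        have := PySem.List.pyRange_one_succ_right (a := 1) (b := 1 + (k : Int)) h
        rw [show (1 : Int) + ((k : Int) + 1) = (1 + (k : Int)) + 1 by ring, this]
      push_cast
      rw [hsplit, List.foldl_append, List.foldl_append, List.foldl_append, ih]
      simp

-- ===== VERDICT (by name: the statement is the Claim_ definition above) =====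
theorem fatoriais_lista_spec : Claim_equal_fatoriais_lista := by
  intro maximo _
  unfold Spec_fatoriais_lista fatoriais_lista fatoriais_lista_alt
  rcases le_or_gt maximo 1 with hle | hgt
  · rw [PySem.List.pyRange_one_eq_nil hle]; rfl
  · have hk : maximo = 1 + ((maximo - 1).toNat : Int) := by omega
    rw [hk, pv_invariant]
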